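-- pv_equiv track=rewrite | github.com/e95r/ProgramForSyte | core/reseeding.py | lane_order
-- ===== SOURCE A (Python) =====
-- def lane_order(lanes_count: int) -> list[int]:
--     if lanes_count <= 0:
--         return []
--     if lanes_count == 1:
--         return [1]
--     if lanes_count % 2 == 0:
--         left = lanes_count // 2
--         right = left + 1
--         order: list[int] = []
--         while left >= 1 or right <= lanes_count:
--             if left >= 1:
--                 order.append(left)
--                 left -= 1
--             if right <= lanes_count:
--                 order.append(right)
--                 right += 1
--         return order
--
--     middle = lanes_count // 2 + 1
--     order = [middle]
--     offset = 1
--     while len(order) < lanes_count: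
--         right = middle + offset
--         left = middle - offset
--         if right <= lanes_count:
--             order.append(right)
--         if left >= 1:
--             order.append(left)
--         offset += 1
--     return order
-- ===== SOURCE B (Python) =====
-- def lane_order(lanes_count: int) -> list[int]:
--     if lanes_count <= 0:
--         return []
--     n = lanes_count
--     sign = 1 if n % 2 == 0 else -1
--     return sorted(range(1, n + 1), key=lambda i: (abs(2 * i - (n + 1)), sign * i))
-- ===== Notes on version B (the rewrite author's own statement) =====
-- stated objective: idiomatic
-- what changed: Replaces A's two explicit center-outward two-pointer/offset while-loops (separate even and odd branches) by a single sorted(range(1,n+1), key=...) ranking lanes by distance from the center with a parity-dependent tie-break.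
import Mathlib
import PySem

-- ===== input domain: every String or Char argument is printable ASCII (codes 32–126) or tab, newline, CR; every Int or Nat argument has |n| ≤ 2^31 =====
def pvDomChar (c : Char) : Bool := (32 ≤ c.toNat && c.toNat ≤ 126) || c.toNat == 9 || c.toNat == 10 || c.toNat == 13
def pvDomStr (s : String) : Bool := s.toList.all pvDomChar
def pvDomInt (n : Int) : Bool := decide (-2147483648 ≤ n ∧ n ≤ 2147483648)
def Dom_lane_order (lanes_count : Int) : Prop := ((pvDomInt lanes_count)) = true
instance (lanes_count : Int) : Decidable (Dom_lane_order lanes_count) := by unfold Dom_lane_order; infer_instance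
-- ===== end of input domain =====

-- B replaces A's two explicit center-outward pointer loops by a single sort of 1..n keyed by
-- distance from the center (with a parity-dependent tie-break); objective: idiomatic.

-- ===== PORT A =====
-- the even-n while loop: state (left, right), appends left (if ≥ 1) then right (if ≤ n) each turn
def loopEven (n left right : Int) : List Int :=
  if h : 1 ≤ left ∨ right ≤ n then
    ((if 1 ≤ left then [left] else []) ++ (if right ≤ n then [right] else [])) ++
      loopEven n (if 1 ≤ left then left - 1 else left) (if right ≤ n then right + 1 else right)
  else []
termination_by (left.toNat + (n + 1 - right).toNat)
decreasing_by split_ifs <;> omega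

-- the odd-n while loop: appends middle+offset (if ≤ n) then middle-offset (if ≥ 1) while len < n;
-- fuel only makes the recursion structural; it is never exhausted on the calls lane_order makes
def loopOdd (n middle : Int) (order : List Int) (offset : Int) : Nat → List Int
  | 0 => order
  | fuel + 1 =>
    if (order.length : Int) < n then
      loopOdd n middle
        (order ++ (if middle + offset ≤ n then [middle + offset] else [])
               ++ (if 1 ≤ middle - offset then [middle - offset] else []))
        (offset + 1) fuel
    else order

def lane_order (lanes_count : Int) : List Int :=
  if lanes_count ≤ 0 then []
  else if lanes_count = 1 then [1]
  else if PySem.Int.mod lanes_count 2 = 0 then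
    loopEven lanes_count (PySem.Int.floordiv lanes_count 2) (PySem.Int.floordiv lanes_count 2 + 1)
  else
    loopOdd lanes_count (PySem.Int.floordiv lanes_count 2 + 1)
      [PySem.Int.floordiv lanes_count 2 + 1] 1 lanes_count.toNat

-- ===== PORT B =====
def lane_order_alt (lanes_count : Int) : List Int :=
  if lanes_count ≤ 0 then []
  else
    let sign : Int := if PySem.Int.mod lanes_count 2 = 0 then 1 else -1
    PySem.List.sorted2 (PySem.List.pyRange 1 (lanes_count + 1) 1)
      (fun i => |2 * i - (lanes_count + 1)|) (fun i => sign * i) false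

-- ===== PRECONDITION & SPEC =====
def Spec_lane_order (lanes_count : Int) (out : List Int) : Prop := out = lane_order_alt lanes_count
instance (lanes_count : Int) (out : List Int) : Decidable (Spec_lane_order lanes_count out) := by unfold Spec_lane_order; infer_instance

-- ===== CLAIM (what is proved, stated in full; the proofs are below) =====
def Claim_equal_lane_order : Prop := ∀ (lanes_count : Int), Dom_lane_order lanes_count → Spec_lane_order lanes_count (lane_order lanes_count)

-- ===== LEMMAS AND PROOFS =====

-- the common value both programs compute, n = 2*h even resp. n = 2*m-1 odd
def targetE (h : Nat) : List Int :=
  (List.range h).flatMap (fun (k : Nat) => [(h : Int) - k, (h : Int) + 1 + k])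

def targetO (m : Nat) : List Int :=
  (m : Int) :: (List.range (m - 1)).flatMap (fun (k : Nat) => [(m : Int) + 1 + k, (m : Int) - 1 - k])

-- ---- A side ----
lemma loopEven_run (n : Int) (d : Nat) (hd : (d : Int) ≤ n) :
    loopEven n d (n + 1 - d) =
      (List.range d).flatMap (fun (k : Nat) => [(d : Int) - k, n + 1 - d + k]) := by
  induction d with
  | zero => rw [loopEven]; simp
  | succ d ih =>
    rw [loopEven]
    have h1 : (1 : Int) ≤ (d + 1 : Nat) := by push_cast; omega
    have h2 : n + 1 - (d + 1 : Nat) ≤ n := by push_cast; omega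
    rw [dif_pos (Or.inl h1)]
    simp only [if_pos h1, if_pos h2]
    have e1 : ((d + 1 : Nat) : Int) - 1 = d := by push_cast; ring
    have e2 : n + 1 - ((d + 1 : Nat) : Int) + 1 = n + 1 - d := by push_cast; ring
    rw [e1, e2, ih (by omega)]
    rw [List.range_succ_eq_map]
    simp only [List.flatMap_cons, List.flatMap_map]
    push_cast
    congr 1
    · norm_num
    · congr 1; funext k
      simp only [List.cons.injEq, and_true]
      exact ⟨by push_cast; ring, by push_cast; ring⟩

lemma loopOdd_run (m : Nat) (hm : 1 ≤ m) :
    ∀ (fuel j : Nat) (order : List Int), order.length = 1 + 2 * j → j ≤ m - 1 →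
      m - 1 - j < fuel →
      loopOdd (2 * m - 1) m order ((j : Int) + 1) fuel =
        order ++ (List.range (m - 1 - j)).flatMap
          (fun (k : Nat) => [(m : Int) + 1 + j + k, (m : Int) - 1 - j - k]) := by
  intro fuel
  induction fuel with
  | zero => intro j order _ _ hf; omega
  | succ fuel ih =>
    intro j order hlen hj hf
    rw [loopOdd]
    by_cases hjm : j = m - 1
    · have : ¬ ((order.length : Int) < 2 * m - 1) := by push_cast; omega
      rw [if_neg this]
      simp [hjm]
    · have hlt : (order.length : Int) < 2 * m - 1 := by push_cast; omega
      rw [if_pos hlt]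
      have hr : (m : Int) + ((j : Int) + 1) ≤ 2 * m - 1 := by push_cast; omega
      have hl : (1 : Int) ≤ (m : Int) - ((j : Int) + 1) := by push_cast; omega
      rw [if_pos hr, if_pos hl]
      have := ih (j + 1)
        (order ++ [(m : Int) + ((j : Int) + 1)] ++ [(m : Int) - ((j : Int) + 1)])
        (by simp [hlen]; omega) (by omega) (by omega)
      rw [show ((j : Int) + 1 + 1) = (((j + 1 : Nat) : Int) + 1) by push_cast; ring] at *
      rw [this]
      rw [show m - 1 - j = (m - 1 - (j + 1)) + 1 by omega, List.range_succ_eq_map]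
      simp only [List.flatMap_cons, List.flatMap_map, List.append_assoc, List.cons_append,
        List.nil_append]
      congr 2
      · push_cast; ring
      · congr 1
        · push_cast; ring
        · congr 1; funext k
          simp only [List.cons.injEq, and_true]
          exact ⟨by push_cast; ring, by push_cast; ring⟩

-- ---- B side ----
-- sorted2 with keys k1, k2 is sorted with the lexicographic key (k1 x, k2 x)
lemma sorted2_eq_sorted_lex (xs : List Int) (k1 k2 : Int → Int) :
    PySem.List.sorted2 xs k1 k2 false =
      PySem.List.sorted xs (fun x => (toLex (k1 x, k2 x) : Int ×ₗ Int)) false := by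
  have hbef : (fun a b : Int => decide (k1 a < k1 b) || (!decide (k1 b < k1 a) && decide (k2 a < k2 b)))
      = (fun a b : Int => decide ((toLex (k1 a, k2 a) : Int ×ₗ Int) < toLex (k1 b, k2 b))) := by
    funext a b
    rw [Bool.eq_iff_iff]
    simp only [Bool.or_eq_true, Bool.and_eq_true, Bool.not_eq_true',
      decide_eq_true_eq, decide_eq_false_iff_not, Prod.Lex.toLex_lt_toLex]
    rcases lt_trichotomy (k1 a) (k1 b) with h | h | h <;>
      simp [h, lt_asymm] <;> omega
  rw [PySem.List.sorted_eq_foldl_insertBy]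
  show List.foldl (fun acc x => PySem.List.insertBy
      (fun a b : Int => decide (k1 a < k1 b) || (!decide (k1 b < k1 a) && decide (k2 a < k2 b))) x acc) [] xs = _
  rw [hbef]

lemma flatMap_pair_perm {α β : Type} (l : List β) (f g : β → List α) :
    (l.flatMap fun k => f k ++ g k).Perm (l.flatMap f ++ l.flatMap g) := by
  induction l with
  | nil => simp
  | cons a l ih =>
    simp only [List.flatMap_cons, List.append_assoc]
    refine ((ih.append_left _).append_left _).trans ?_
    refine List.Perm.append_left (f a) ?_
    exact (List.perm_append_comm_assoc _ _ _)

lemma map_sub_eq_reverse (c : Int) (h : Nat) :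
    (List.range h).map (fun (k : Nat) => (c + (h : Int) - 1) - k) =
      ((List.range h).map (fun (k : Nat) => c + k)).reverse := by
  apply List.ext_getElem
  · simp
  · intro i h1 h2
    simp only [List.length_map, List.length_range] at h1
    rw [List.getElem_reverse]
    simp only [List.getElem_map, List.getElem_range, List.length_map, List.length_range]
    omega

lemma perm_even (h : Nat) :
    (targetE h).Perm (PySem.List.pyRange 1 (2 * (h : Int) + 1) 1) := by
  rw [PySem.List.pyRange_one_append 1 ((h : Int) + 1) (2 * (h : Int) + 1) (by omega) (by omega)]
  have re1 : PySem.List.pyRange 1 ((h : Int) + 1) =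
      (List.range h).map (fun (k : Nat) => (1 : Int) + k) := by
    rw [PySem.List.pyRange_one, show ((h : Int) + 1 - 1).toNat = h by omega]
  have re2 : PySem.List.pyRange ((h : Int) + 1) (2 * (h : Int) + 1) =
      (List.range h).map (fun (k : Nat) => (h : Int) + 1 + k) := by
    rw [PySem.List.pyRange_one, show (2 * (h : Int) + 1 - ((h : Int) + 1)).toNat = h by omega]
  rw [re1, re2]
  unfold targetE
  refine (flatMap_pair_perm (List.range h) (fun (k : Nat) => [(h : Int) - k])
    (fun (k : Nat) => [(h : Int) + 1 + k])).trans ?_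
  have eL : (List.range h).flatMap (fun (k : Nat) => [(h : Int) - k]) =
      (List.range h).map (fun (k : Nat) => (h : Int) - k) := (List.map_eq_flatMap).symm
  have eR : (List.range h).flatMap (fun (k : Nat) => [(h : Int) + 1 + k]) =
      (List.range h).map (fun (k : Nat) => (h : Int) + 1 + k) := (List.map_eq_flatMap).symm
  rw [eL, eR]
  refine List.Perm.append ?_ (List.Perm.refl _)
  have e3 : (fun (k : Nat) => (h : Int) - k) =
      (fun (k : Nat) => ((1 : Int) + (h : Int) - 1) - k) := by funext k; omega
  rw [e3, map_sub_eq_reverse 1 h]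
  exact List.reverse_perm _

lemma perm_odd (m : Nat) (hm : 1 ≤ m) :
    (targetO m).Perm (PySem.List.pyRange 1 (2 * (m : Int)) 1) := by
  rw [PySem.List.pyRange_one_append 1 (m : Int) (2 * (m : Int)) (by omega) (by omega)]
  rw [PySem.List.pyRange_one_cons (by omega : (m : Int) < 2 * (m : Int))]
  unfold targetO
  refine List.Perm.trans ?_ (List.perm_middle.symm)
  refine List.Perm.cons _ ?_
  refine (flatMap_pair_perm (List.range (m - 1)) (fun (k : Nat) => [(m : Int) + 1 + k])
    (fun (k : Nat) => [(m : Int) - 1 - k])).trans ?_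
  have eL : (List.range (m - 1)).flatMap (fun (k : Nat) => [(m : Int) + 1 + k]) =
      (List.range (m - 1)).map (fun (k : Nat) => (m : Int) + 1 + k) := (List.map_eq_flatMap).symm
  have eR : (List.range (m - 1)).flatMap (fun (k : Nat) => [(m : Int) - 1 - k]) =
      (List.range (m - 1)).map (fun (k : Nat) => (m : Int) - 1 - k) := (List.map_eq_flatMap).symm
  rw [eL, eR]
  have r1 : PySem.List.pyRange 1 (m : Int) =
      (List.range (m - 1)).map (fun (k : Nat) => (1 : Int) + k) := by
    rw [PySem.List.pyRange_one, show ((m : Int) - 1).toNat = m - 1 by omega]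
  have r2 : PySem.List.pyRange ((m : Int) + 1) (2 * (m : Int)) =
      (List.range (m - 1)).map (fun (k : Nat) => (m : Int) + 1 + k) := by
    rw [PySem.List.pyRange_one, show (2 * (m : Int) - ((m : Int) + 1)).toNat = m - 1 by omega]
  rw [r1, r2]
  refine List.perm_append_comm.trans ?_
  refine List.Perm.append ?_ (List.Perm.refl _)
  have e3 : (fun (k : Nat) => (m : Int) - 1 - k) =
      (fun (k : Nat) => ((1 : Int) + ((m - 1 : Nat) : Int) - 1) - k) := by funext k; omega
  rw [e3, map_sub_eq_reverse 1 (m - 1)]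
  exact List.reverse_perm _

lemma pairwise_even (h : Nat) :
    (targetE h).Pairwise (fun a b =>
      (toLex (|2 * a - (2 * (h : Int) + 1)|, 1 * a) : Int ×ₗ Int) <
        toLex (|2 * b - (2 * (h : Int) + 1)|, 1 * b)) := by
  unfold targetE
  rw [List.pairwise_flatMap]
  constructor
  · intro k _
    refine List.pairwise_cons.2 ⟨?_, by simp⟩
    intro b hb
    simp only [List.mem_singleton] at hb
    subst hb
    rw [Prod.Lex.toLex_lt_toLex]
    right
    constructor
    · rw [show 2 * ((h : Int) - k) - (2 * h + 1) = -(2 * k + 1) by ring, abs_neg,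
        show 2 * ((h : Int) + 1 + k) - (2 * h + 1) = 2 * k + 1 by ring]
    · omega
  · refine List.Pairwise.imp_of_mem ?_ (List.pairwise_lt_range (n := h))
    intro k1 k2 hk1 hk2 hlt x hx y hy
    rw [Prod.Lex.toLex_lt_toLex]
    left
    have hx' : x = (h : Int) - k1 ∨ x = (h : Int) + 1 + k1 := by simpa using hx
    have hy' : y = (h : Int) - k2 ∨ y = (h : Int) + 1 + k2 := by simpa using hy
    have a1 : ∀ k : Nat, |2 * ((h : Int) - k) - (2 * h + 1)| = 2 * k + 1 := by
      intro k
      rw [show 2 * ((h : Int) - k) - (2 * h + 1) = -(2 * k + 1) by ring, abs_neg,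
        abs_of_nonneg (by positivity)]
    have a2 : ∀ k : Nat, |2 * ((h : Int) + 1 + k) - (2 * h + 1)| = 2 * k + 1 := by
      intro k
      rw [show 2 * ((h : Int) + 1 + k) - (2 * h + 1) = 2 * k + 1 by ring,
        abs_of_nonneg (by positivity)]
    rcases hx' with rfl | rfl <;> rcases hy' with rfl | rfl <;>
      simp only [a1, a2] <;> push_cast <;> omega

lemma pairwise_odd (m : Nat) (hm : 1 ≤ m) :
    (targetO m).Pairwise (fun a b =>
      (toLex (|2 * a - 2 * (m : Int)|, -1 * a) : Int ×ₗ Int) <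
        toLex (|2 * b - 2 * (m : Int)|, -1 * b)) := by
  unfold targetO
  have a1 : ∀ k : Nat, |2 * ((m : Int) + 1 + k) - 2 * m| = 2 * k + 2 := by
    intro k
    rw [show 2 * ((m : Int) + 1 + k) - 2 * m = 2 * k + 2 by ring,
      abs_of_nonneg (by positivity)]
  have a2 : ∀ k : Nat, |2 * ((m : Int) - 1 - k) - 2 * m| = 2 * k + 2 := by
    intro k
    rw [show 2 * ((m : Int) - 1 - k) - 2 * m = -(2 * k + 2) by ring, abs_neg,
      abs_of_nonneg (by positivity)]
  refine List.pairwise_cons.2 ⟨?_, ?_⟩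
  · intro b hb
    rw [List.mem_flatMap] at hb
    obtain ⟨k, _, hk⟩ := hb
    rw [Prod.Lex.toLex_lt_toLex]
    left
    have hb' : b = (m : Int) + 1 + k ∨ b = (m : Int) - 1 - k := by simpa using hk
    rw [show 2 * (m : Int) - 2 * m = 0 by ring]
    rcases hb' with rfl | rfl <;> simp only [a1, a2] <;> positivity
  · rw [List.pairwise_flatMap]
    constructor
    · intro k _
      refine List.pairwise_cons.2 ⟨?_, by simp⟩
      intro b hb
      simp only [List.mem_singleton] at hb
      subst hb
      rw [Prod.Lex.toLex_lt_toLex]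
      right
      exact ⟨by rw [a1, a2], by push_cast; omega⟩
    · refine List.Pairwise.imp_of_mem ?_ (List.pairwise_lt_range (n := m - 1))
      intro k1 k2 hk1 hk2 hlt x hx y hy
      rw [Prod.Lex.toLex_lt_toLex]
      left
      have hx' : x = (m : Int) + 1 + k1 ∨ x = (m : Int) - 1 - k1 := by simpa using hx
      have hy' : y = (m : Int) + 1 + k2 ∨ y = (m : Int) - 1 - k2 := by simpa using hy
      rcases hx' with rfl | rfl <;> rcases hy' with rfl | rfl <;>
        simp only [a1, a2] <;> push_cast <;> omega

-- ===== VERDICT (by name: the statement is the Claim_ definition above) =====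
theorem lane_order_spec : Claim_equal_lane_order := by
  intro n _
  unfold Spec_lane_order lane_order lane_order_alt
  by_cases h0 : n ≤ 0
  · simp [h0]
  · rw [if_neg h0, if_neg h0]
    replace h0 : 0 < n := by omega
    by_cases hev : PySem.Int.mod n 2 = 0
    · -- even, n = 2*h with h ≥ 1
      have hdvd : 2 ∣ n := (PySem.Int.mod_eq_zero_iff_dvd n 2).1 hev
      obtain ⟨h, rfl⟩ : ∃ h : Nat, n = 2 * (h : Int) := by
        obtain ⟨c, hc⟩ := hdvd
        exact ⟨c.toNat, by omega⟩
      have hh : 1 ≤ h := by omega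
      rw [if_neg (by omega : ¬ (2 * (h : Int)) = 1), if_pos hev]
      simp only [hev, reduceIte]
      have hfd : PySem.Int.floordiv (2 * (h : Int)) 2 = (h : Int) := by
        rw [PySem.Int.floordiv_eq_ediv_of_pos (by omega)]; omega
      rw [hfd]
      have hrun := loopEven_run (2 * (h : Int)) h (by omega)
      rw [show 2 * (h : Int) + 1 - (h : Int) = (h : Int) + 1 by ring] at hrun
      rw [hrun]
      rw [show (List.range h).flatMap (fun (k : Nat) => [(h : Int) - k, (h : Int) + 1 + k]) =
        targetE h from rfl]
      rw [sorted2_eq_sorted_lex]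
      exact (PySem.List.sorted_eq_of_perm_of_pairwise_lt _ _ _
        (perm_even h) (pairwise_even h)).symm
    · -- odd, n = 2*m - 1 with m ≥ 1
      obtain ⟨m, hm, rfl⟩ : ∃ m : Nat, 1 ≤ m ∧ n = 2 * (m : Int) - 1 := by
        refine ⟨((n + 1) / 2).toNat, by omega, ?_⟩
        have : ¬ (2 ∣ n) := fun hd => hev ((PySem.Int.mod_eq_zero_iff_dvd n 2).2 hd)
        omega
      rw [if_neg hev]
      simp only [hev, reduceIte]
      by_cases hm1 : m = 1
      · subst hm1; norm_num; decide
      · have hm2 : 2 ≤ m := by omega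
        rw [if_neg (by push_cast; omega : ¬ (2 * (m : Int) - 1) = 1)]
        have hfd : PySem.Int.floordiv (2 * (m : Int) - 1) 2 + 1 = (m : Int) := by
          rw [PySem.Int.floordiv_eq_ediv_of_pos (by omega)]; omega
        rw [hfd]
        have hrun := loopOdd_run m (by omega) ((2 * (m : Int) - 1).toNat) 0 [(m : Int)]
          (by simp) (by omega) (by omega)
        rw [show ((0 : Nat) : Int) + 1 = 1 by norm_num] at hrun
        rw [hrun]
        have heq : ([(m : Int)] ++ (List.range (m - 1 - 0)).flatMap
            (fun (k : Nat) => [(m : Int) + 1 + ((0 : Nat) : Int) + k, (m : Int) - 1 - ((0 : Nat) : Int) - k])) =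
            targetO m := by
          unfold targetO
          simp
        rw [heq]
        rw [show 2 * (m : Int) - 1 + 1 = 2 * (m : Int) by ring]
        rw [sorted2_eq_sorted_lex]
        exact (PySem.List.sorted_eq_of_perm_of_pairwise_lt _ _ _
          (perm_odd m hm) (pairwise_odd m hm)).symm
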